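-- pv_equiv track=rewrite | github.com/john74/homepage-scraper | sport24/scraper.py | get_unique_pairs
-- ===== SOURCE A (Python) =====
-- def get_unique_pairs(recent_articles):
--     """
--     Rejects the keys that have the same value with other keys
--     in the dictionary, and returns the unique pairs.
--     """
--     pairs = {}
--     urls = []
--     for category, url in recent_articles.items():
--         if url in urls:
--             continue
--         urls.append(url)
--         pairs[category] = url
--     return pairs
-- ===== SOURCE B (Python) =====
-- def get_unique_pairs(recent_articles):
--     """
--     Rejects the keys that have the same value with other keys
--     in the dictionary, and returns the unique pairs.
--     """
--     pairs = {}
--     pending = list(recent_articles.items())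
--     while pending:
--         category, url = pending[0]
--         pairs[category] = url
--         pending = [(c, u) for c, u in pending[1:] if u != url]
--     return pairs
-- ===== Notes on version B (the rewrite author's own statement) =====
-- stated objective: alternative
-- what changed: B keeps no seen-URL collection at all: a sieve-style worklist loop takes the head pair, records it, and purges every later pair with the same URL from the worklist, so uniqueness is obtained by elimination instead of A's per-item membership test against a growing list.
import Mathlib
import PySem

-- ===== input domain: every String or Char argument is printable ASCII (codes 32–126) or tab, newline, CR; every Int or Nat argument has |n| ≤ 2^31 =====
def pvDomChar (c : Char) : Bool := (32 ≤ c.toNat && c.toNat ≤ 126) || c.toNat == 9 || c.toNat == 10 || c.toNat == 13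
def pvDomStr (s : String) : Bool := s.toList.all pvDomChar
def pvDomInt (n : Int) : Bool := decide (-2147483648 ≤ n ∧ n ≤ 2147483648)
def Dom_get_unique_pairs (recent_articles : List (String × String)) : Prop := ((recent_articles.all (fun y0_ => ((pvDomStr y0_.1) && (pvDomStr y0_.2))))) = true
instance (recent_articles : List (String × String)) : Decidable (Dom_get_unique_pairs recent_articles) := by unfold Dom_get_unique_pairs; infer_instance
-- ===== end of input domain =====

-- B replaces A's seen-URL list + membership test with a sieve-style worklist:
-- take the head pair, record it, purge later pairs with the same URL; alternative decomposition, same results.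


-- ===== PORT A =====
-- pairs = {}; urls = []; for category, url in items: if url in urls: continue; urls.append(url); pairs[category] = url
def get_unique_pairs (recent_articles : List (String × String)) : List (String × String) :=
  (recent_articles.foldl
    (fun (st : PySem.Dict String String × List String) cu =>
      if cu.2 ∈ st.2 then st
      else (st.1.insert cu.1 cu.2, st.2 ++ [cu.2]))
    (PySem.Dict.empty, [])).1.items

-- ===== PORT B =====
-- while pending: (category, url) = pending[0]; pairs[category] = url; pending = [(c,u) for (c,u) in pending[1:] if u != url]
def pvSieve : PySem.Dict String String → List (String × String) → PySem.Dict String String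
  | pairs, [] => pairs
  | pairs, (c, u) :: rest =>
      pvSieve (pairs.insert c u) (rest.filter (fun p => p.2 != u))
termination_by _ pending => pending.length
decreasing_by
  simpa using Nat.lt_succ_of_le (le_trans (List.length_filter_le _ _) (le_of_eq rest.length_attach))

def get_unique_pairs_alt (recent_articles : List (String × String)) : List (String × String) :=
  (pvSieve PySem.Dict.empty recent_articles).items

-- ===== PRECONDITION & SPEC =====
def Spec_get_unique_pairs (recent_articles : List (String × String)) (out : List (String × String)) : Prop := out = get_unique_pairs_alt recent_articles
instance (recent_articles : List (String × String)) (out : List (String × String)) : Decidable (Spec_get_unique_pairs recent_articles out) := by unfold Spec_get_unique_pairs; infer_instance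

-- ===== CLAIM (what is proved, stated in full; the proofs are below) =====
def Claim_equal_get_unique_pairs : Prop := ∀ (recent_articles : List (String × String)), Dom_get_unique_pairs recent_articles → Spec_get_unique_pairs recent_articles (get_unique_pairs recent_articles)

-- ===== LEMMAS AND PROOFS =====

-- A's fold from state (d, us) on l builds the same dict as the sieve run on l with the
-- already-seen urls us filtered out up front.
theorem pv_fold_eq_sieve (l : List (String × String)) :
    ∀ (d : PySem.Dict String String) (us : List String),
      (l.foldl
        (fun (st : PySem.Dict String String × List String) cu =>
          if cu.2 ∈ st.2 then st
          else (st.1.insert cu.1 cu.2, st.2 ++ [cu.2]))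
        (d, us)).1
      = pvSieve d (l.filter (fun p => decide (p.2 ∉ us))) := by
  induction l with
  | nil => intro d us; rw [List.foldl_nil, List.filter_nil, pvSieve]
  | cons cu l ih =>
    intro d us
    obtain ⟨c, u⟩ := cu
    simp only [List.foldl_cons, List.filter_cons]
    by_cases h : u ∈ us
    · rw [if_pos h, if_neg (by simp [h])]
      exact ih d us
    · rw [if_neg h, if_pos (by simp [h])]
      rw [pvSieve, List.filter_filter]
      have hpred : ∀ p : String × String,
          ((p.2 != u) && decide (p.2 ∉ us)) = decide (p.2 ∉ us ++ [u]) := by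
        intro p
        by_cases h1 : p.2 = u <;> by_cases h2 : p.2 ∈ us <;>
          simp [h1, h2, bne]
      rw [List.filter_congr (fun p _ => hpred p)]
      exact ih (d.insert c u) (us ++ [u])

-- ===== VERDICT (by name: the statement is the Claim_ definition above) =====
theorem get_unique_pairs_spec : Claim_equal_get_unique_pairs := by
  intro l _
  show get_unique_pairs l = get_unique_pairs_alt l
  unfold get_unique_pairs get_unique_pairs_alt
  rw [pv_fold_eq_sieve l PySem.Dict.empty []]
  simp
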